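-- pv_equiv track=rewrite | github.com/shun-shobon/mulprec | test/pi.py | calc_delta_x_0
-- ===== SOURCE A (Python) =====
-- import functools
--
-- shift = 100
--
-- def factorial(n):
--     return functools.reduce(lambda x, y: x * y, range(1, n + 1), 1)
--
-- def com(n, k):
--     return factorial(n) // (factorial(k) * factorial(n - k))
--
-- def calc_x(n):
--     left = (10 ** shift) // (4 * n + 1)
--     right = (10 ** shift) // (4 * n + 3)
--     return left + right
--
-- def calc_delta_x_0(n):
--     ans = 0
--     for i in range(n + 1):
--         x = calc_x(i)
--         x *= com(n, i)
--         if n % 2 == 0 and i % 2 == 0: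
--             ans += x
--         elif n % 2 == 0 and i % 2 != 0:
--             ans -= x
--         elif n % 2 != 0 and i % 2 == 0:
--             ans -= x
--         elif n % 2 != 0 and i % 2 != 0:
--             ans += x
--     return ans
-- ===== SOURCE B (Python) =====
-- shift = 100
--
-- def calc_delta_x_0(n):
--     # One pass with incremental binomial update C(n,i+1) = C(n,i)*(n-i)//(i+1).
--     p = 10 ** shift
--     ans = 0
--     c = 1
--     sign = 1 if n % 2 == 0 else -1
--     for i in range(n + 1):
--         x = p // (4 * i + 1) + p // (4 * i + 3)
--         ans += sign * c * x
--         c = c * (n - i) // (i + 1)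
--         sign = -sign
--     return ans
-- ===== Notes on version B (the rewrite author's own statement) =====
-- stated objective: faster
-- what changed: Replaces the per-term binomial coefficient computed from three full factorials (each an O(i) product of big integers) by a single carried coefficient updated incrementally via C(n,i+1)=C(n,i)*(n-i)//(i+1), and folds the four-way parity branching into one alternating sign variable.
import Mathlib
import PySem

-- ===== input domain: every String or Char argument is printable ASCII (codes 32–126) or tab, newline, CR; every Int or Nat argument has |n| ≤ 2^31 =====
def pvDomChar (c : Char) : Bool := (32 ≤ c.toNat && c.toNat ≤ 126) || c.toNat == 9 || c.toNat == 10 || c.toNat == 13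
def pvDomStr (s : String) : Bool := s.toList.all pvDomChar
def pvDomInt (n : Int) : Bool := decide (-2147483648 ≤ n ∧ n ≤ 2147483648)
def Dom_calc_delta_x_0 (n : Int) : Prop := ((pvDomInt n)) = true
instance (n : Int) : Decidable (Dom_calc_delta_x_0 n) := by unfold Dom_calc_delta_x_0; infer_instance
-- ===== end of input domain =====

-- B replaces A's per-term factorial-based binomial coefficients by the incremental
-- update C(n,i+1) = C(n,i)*(n-i)//(i+1) carried through one pass (objective: faster).

-- ===== PORT A =====
def pvFactorial (n : Int) : Int :=
  (PySem.List.pyRange 1 (n + 1) 1).foldl (fun x y => x * y) 1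

def pvCom (n k : Int) : Int :=
  PySem.Int.floordiv (pvFactorial n) (pvFactorial k * pvFactorial (n - k))

def pvCalcX (n : Int) : Int :=
  PySem.Int.floordiv (10 ^ 100) (4 * n + 1) + PySem.Int.floordiv (10 ^ 100) (4 * n + 3)

def pvStepA (n : Int) (ans : Int) (i : Int) : Int :=
  let x := pvCalcX i * pvCom n i
  if PySem.Int.mod n 2 = 0 ∧ PySem.Int.mod i 2 = 0 then ans + x
  else if PySem.Int.mod n 2 = 0 ∧ ¬ PySem.Int.mod i 2 = 0 then ans - x
  else if ¬ PySem.Int.mod n 2 = 0 ∧ PySem.Int.mod i 2 = 0 then ans - x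
  else if ¬ PySem.Int.mod n 2 = 0 ∧ ¬ PySem.Int.mod i 2 = 0 then ans + x
  else ans

def calc_delta_x_0 (n : Int) : Int :=
  (PySem.List.pyRange 0 (n + 1) 1).foldl (pvStepA n) 0

-- ===== PORT B =====
-- loop state (ans, c, sign), exactly Source B's three variables
def pvStepB (n : Int) (s : Int × Int × Int) (i : Int) : Int × Int × Int :=
  let x := PySem.Int.floordiv (10 ^ 100) (4 * i + 1) + PySem.Int.floordiv (10 ^ 100) (4 * i + 3)
  (s.1 + s.2.2 * s.2.1 * x, PySem.Int.floordiv (s.2.1 * (n - i)) (i + 1), -s.2.2)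

def calc_delta_x_0_alt (n : Int) : Int :=
  ((PySem.List.pyRange 0 (n + 1) 1).foldl (pvStepB n)
    (0, 1, if PySem.Int.mod n 2 = 0 then 1 else -1)).1

-- ===== PRECONDITION & SPEC =====
def Spec_calc_delta_x_0 (n : Int) (out : Int) : Prop := out = calc_delta_x_0_alt n
instance (n : Int) (out : Int) : Decidable (Spec_calc_delta_x_0 n out) := by unfold Spec_calc_delta_x_0; infer_instance

-- ===== CLAIM (what is proved, stated in full; the proofs are below) =====
def Claim_equal_calc_delta_x_0 : Prop := ∀ (n : Int), Dom_calc_delta_x_0 n → Spec_calc_delta_x_0 n (calc_delta_x_0 n)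

-- ===== LEMMAS AND PROOFS =====

-- the sign variable of B after m iterations (with n = N): +1 iff N and m have equal parity
def pvSgn (N m : Nat) : Int := if (N + m) % 2 = 0 then 1 else -1

lemma pvFactorial_cast (k : Nat) : pvFactorial (k : Int) = (Nat.factorial k : Int) := by
  induction k with
  | zero => simp [pvFactorial]
  | succ k ih =>
    unfold pvFactorial at *
    have h : ((k+1 : Nat) : Int) + 1 = ((k:Int) + 1) + 1 := by push_cast; ring
    rw [h, PySem.List.pyRange_one_succ_right (by omega), List.foldl_append, ih]
    simp [Nat.factorial_succ]; ring

lemma pvCom_cast {N k : Nat} (h : k ≤ N) : pvCom (N:Int) (k:Int) = (N.choose k : Int) := by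
  unfold pvCom
  have hnk : ((N:Int) - (k:Int)) = ((N - k : Nat) : Int) := by omega
  rw [hnk, pvFactorial_cast, pvFactorial_cast, pvFactorial_cast]
  rw [show ((k.factorial : Int) * ((N-k).factorial : Int)) = ((k.factorial * (N-k).factorial : Nat) : Int) by push_cast; ring]
  rw [PySem.Int.floordiv_natCast]
  congr 1
  refine Nat.div_eq_of_eq_mul_left (by positivity) ?_
  rw [← Nat.choose_mul_factorial_mul_factorial h]; ring

lemma pvChoose_step {N m : Nat} (h : m ≤ N) :
    PySem.Int.floordiv ((N.choose m : Int) * ((N : Int) - (m : Int))) ((m : Int) + 1)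
      = (N.choose (m + 1) : Int) := by
  have hnm : ((N:Int) - (m:Int)) = ((N - m : Nat) : Int) := by omega
  rw [hnm, show ((N.choose m : Int) * ((N-m : Nat) : Int)) = ((N.choose m * (N-m) : Nat) : Int) by push_cast; ring,
    show ((m:Int) + 1) = ((m+1 : Nat) : Int) by push_cast; ring, PySem.Int.floordiv_natCast]
  have : (N.choose m * (N-m)) / (m+1) = N.choose (m+1) :=
    Nat.div_eq_of_eq_mul_left (by omega) (by rw [← Nat.choose_succ_right_eq])
  exact_mod_cast this

lemma pvSgn_succ (N m : Nat) : -pvSgn N m = pvSgn N (m + 1) := by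
  unfold pvSgn; split_ifs with h1 h2 h2 <;> omega

lemma pvStepA_eq {N m : Nat} (hm : m ≤ N) (acc : Int) :
    pvStepA (N:Int) acc (m:Int) = acc + pvSgn N m * (N.choose m : Int) * pvCalcX (m:Int) := by
  have hNm : PySem.Int.mod (N:Int) 2 = ((N % 2 : Nat) : Int) := by
    exact_mod_cast PySem.Int.mod_natCast N 2
  have hMm : PySem.Int.mod (m:Int) 2 = ((m % 2 : Nat) : Int) := by
    exact_mod_cast PySem.Int.mod_natCast m 2
  have c1 : (PySem.Int.mod (N:Int) 2 = 0) ↔ (N % 2 = 0) := by rw [hNm]; omega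
  have c2 : (PySem.Int.mod ((m:Int)) 2 = 0) ↔ (m % 2 = 0) := by rw [hMm]; omega
  unfold pvStepA pvSgn
  rw [pvCom_cast hm]
  simp only [c1, c2]
  rcases Nat.mod_two_eq_zero_or_one N with hN | hN <;>
    rcases Nat.mod_two_eq_zero_or_one m with hM | hM <;>
      simp [hN, hM, Nat.add_mod] <;> ring

lemma pvStepB_eq {N m : Nat} (hm : m ≤ N) (acc : Int) :
    pvStepB (N:Int) (acc, (N.choose m : Int), pvSgn N m) (m:Int)
      = (acc + pvSgn N m * (N.choose m : Int) * pvCalcX (m:Int),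
         (N.choose (m+1) : Int), pvSgn N (m+1)) := by
  unfold pvStepB
  refine Prod.ext ?_ (Prod.ext ?_ ?_)
  · show acc + pvSgn N m * (N.choose m : Int) * _ = _
    rw [show (PySem.Int.floordiv (10 ^ 100) (4 * (m:Int) + 1) + PySem.Int.floordiv (10 ^ 100) (4 * (m:Int) + 3)) = pvCalcX (m:Int) from rfl]
  · exact pvChoose_step hm
  · exact pvSgn_succ N m

-- coupling invariant: after m steps B's state is (A's accumulator, C(N,m), the sign for step m)
lemma pvMain (N : Nat) : ∀ m : Nat, m ≤ N + 1 →
    (PySem.List.pyRange 0 (m : Int) 1).foldl (pvStepB (N : Int)) (0, 1, pvSgn N 0)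
      = ((PySem.List.pyRange 0 (m : Int) 1).foldl (pvStepA (N : Int)) 0,
         (N.choose m : Int), pvSgn N m) := by
  intro m
  induction m with
  | zero =>
    intro _
    rw [PySem.List.pyRange_one_eq_nil (by omega)]
    simp
  | succ m ih =>
    intro hm
    have hmN : m ≤ N := by omega
    have hc : ((m+1 : Nat) : Int) = (m : Int) + 1 := by push_cast; ring
    rw [hc, PySem.List.pyRange_one_succ_right (by omega), List.foldl_append, List.foldl_append,
      ih (by omega)]
    simp only [List.foldl_cons, List.foldl_nil]
    rw [pvStepB_eq hmN, pvStepA_eq hmN]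

-- ===== VERDICT (by name: the statement is the Claim_ definition above) =====
theorem calc_delta_x_0_spec : Claim_equal_calc_delta_x_0 := by
  intro n _
  unfold Spec_calc_delta_x_0 calc_delta_x_0 calc_delta_x_0_alt
  by_cases hn : 0 ≤ n
  · obtain ⟨N, rfl⟩ : ∃ N : Nat, n = (N : Int) := ⟨n.toNat, by omega⟩
    have h0 : (if PySem.Int.mod ((N : Int)) 2 = 0 then (1:Int) else -1) = pvSgn N 0 := by
      have hNm : PySem.Int.mod (N:Int) 2 = ((N % 2 : Nat) : Int) := by
        exact_mod_cast PySem.Int.mod_natCast N 2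
      unfold pvSgn
      rw [hNm]
      split_ifs with h1 h2 h2 <;> first | rfl | (exfalso; omega)
    rw [h0]
    have h1 : ((N : Int) + 1) = ((N + 1 : Nat) : Int) := by push_cast; ring
    rw [h1, pvMain N (N + 1) (le_refl _)]
  · rw [PySem.List.pyRange_one_eq_nil (by omega)]
    simp
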